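-- pv_equiv track=rewrite | github.com/endy-see/AlgorithmPython | ZuoShen/34-MaxAbsBetweenLeftAndRight.py | maxAbs2
-- ===== SOURCE A (Python) =====
-- def maxAbs2(arr):
--     lArr = [0] * len(arr)
--     rArr = [0] * len(arr)
--     lArr[0] = arr[0]
--     rArr[-1] = arr[-1]
--     for i in range(1, len(arr)):
--         lArr[i] = max(lArr[i-1], arr[i])
--     for i in range(len(arr)-2, -1, -1):
--         rArr[i] = max(rArr[i+1], arr[i])
--     max_res = 0
--     for i in range(len(arr)-1):
--         max_res = max(max_res, abs(lArr[i]-rArr[i+1]))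
--     return max_res
-- ===== SOURCE B (Python) =====
-- def maxAbs2(arr):
--     return max(arr) - min(arr[0], arr[-1])
-- ===== Notes on version B (the rewrite author's own statement) =====
-- stated objective: faster
-- what changed: Replaces the three loops and two O(n) auxiliary prefix/suffix-max lists by the closed form: the maximum of the whole list minus the smaller of its first and last elements (the optimum split always pushes the global maximum against one endpoint), one builtin pass and O(1) extra space.
import Mathlib
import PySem

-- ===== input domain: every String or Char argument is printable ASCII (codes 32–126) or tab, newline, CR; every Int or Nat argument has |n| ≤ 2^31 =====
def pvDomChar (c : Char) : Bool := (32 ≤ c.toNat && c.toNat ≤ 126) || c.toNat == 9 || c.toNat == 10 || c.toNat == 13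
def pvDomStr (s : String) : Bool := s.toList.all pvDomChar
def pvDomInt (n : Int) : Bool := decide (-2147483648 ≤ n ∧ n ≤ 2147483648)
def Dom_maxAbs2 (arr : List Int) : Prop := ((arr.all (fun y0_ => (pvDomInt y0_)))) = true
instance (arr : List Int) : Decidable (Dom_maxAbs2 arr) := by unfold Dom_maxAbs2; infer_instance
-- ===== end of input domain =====

-- B replaces A's three loops and two auxiliary arrays by the closed form
-- max of the list minus the smaller of its first and last elements; measured faster, O(1) extra space.
-- Both programs raise on the empty list (IndexError / ValueError), excluded by Pre_.

-- ===== PORT A =====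
-- forward loop: lArr[i] = max(lArr[i-1], arr[i]) for the elements after arr[0]
def preMax (p : Int) : List Int → List Int
  | [] => []
  | x :: xs => (max p x) :: preMax (max p x) xs

-- backward loop: rArr[i] = max(rArr[i+1], arr[i]), rArr[-1] = arr[-1]
def sufMax : List Int → List Int
  | [] => []
  | [x] => [x]
  | x :: y :: xs =>
    match sufMax (y :: xs) with
    | [] => [x]            -- unreachable: sufMax of a nonempty list is nonempty
    | m :: ms => max x m :: m :: ms

def maxAbs2 (arr : List Int) : Int :=
  match arr with
  | [] => 0                -- Python raises IndexError here; excluded by Pre_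
  | a :: rest =>
    let lArr := a :: preMax a rest
    let rArr := sufMax (a :: rest)
    -- for i in range(len(arr)-1): max_res = max(max_res, abs(lArr[i]-rArr[i+1]))
    (lArr.zip rArr.tail).foldl (fun m p => max m |p.1 - p.2|) 0

-- ===== PORT B =====
def maxAbs2_alt (arr : List Int) : Int :=
  ((PySem.List.max? arr (fun y => y)).getD 0)
    - min (PySem.List.pyGetD arr 0 0) (PySem.List.pyGetD arr (-1) 0)

-- ===== PRECONDITION & SPEC =====
-- A raises IndexError on the empty list (and B's max(arr) raises ValueError there).
def Pre_maxAbs2 (arr : List Int) : Prop := arr ≠ []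
instance (arr : List Int) : Decidable (Pre_maxAbs2 arr) := by unfold Pre_maxAbs2; infer_instance
def pvWitness_maxAbs2 : List Int := ([1, 3, 2])

def Spec_maxAbs2 (arr : List Int) (out : Int) : Prop := out = maxAbs2_alt arr
instance (arr : List Int) (out : Int) : Decidable (Spec_maxAbs2 arr out) := by unfold Spec_maxAbs2; infer_instance

-- ===== CLAIM (what is proved, stated in full; the proofs are below) =====
def Claim_equal_maxAbs2 : Prop := ∀ (arr : List Int), Dom_maxAbs2 arr → Pre_maxAbs2 arr → Spec_maxAbs2 arr (maxAbs2 arr)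

-- ===== LEMMAS AND PROOFS =====

theorem foldl_max_assoc (t : List Int) : ∀ c d : Int, t.foldl max (max c d) = max c (t.foldl max d) := by
  induction t with
  | nil => intro c d; rfl
  | cons z t ih =>
    intro c d
    simp only [List.foldl_cons, max_assoc]
    exact ih c (max d z)

theorem foldl_step_max (L : List (Int × Int)) :
    ∀ c d : Int, L.foldl (fun m p => max m |p.1 - p.2|) (max c d)
      = max c (L.foldl (fun m p => max m |p.1 - p.2|) d) := by
  induction L with
  | nil => intro c d; rfl
  | cons p L ih =>
    intro c d
    simp only [List.foldl_cons, max_assoc]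
    exact ih c (max d |p.1 - p.2|)

theorem sufMax_ne_nil (x : Int) (rs : List Int) : sufMax (x :: rs) ≠ [] := by
  cases rs with
  | nil => simp [sufMax]
  | cons y t =>
    simp only [sufMax]
    cases sufMax (y :: t) <;> simp

theorem sufMax_headD (x : Int) (rs : List Int) :
    (sufMax (x :: rs)).headD 0 = rs.foldl max x := by
  induction rs generalizing x with
  | nil => rfl
  | cons y t ih =>
    simp only [sufMax]
    cases h : sufMax (y :: t) with
    | nil => exact absurd h (sufMax_ne_nil y t)
    | cons m ms =>
      have hm : m = t.foldl max y := by
        have := ih y; rw [h] at this; simpa using this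
      simp only [List.headD_cons, List.foldl_cons, hm]
      rw [← foldl_max_assoc]

theorem le_foldl_max_self (t : List Int) : ∀ c : Int, c ≤ t.foldl max c := by
  induction t with
  | nil => intro c; simp
  | cons z t ih =>
    intro c
    simp only [List.foldl_cons]
    exact le_trans (le_max_left c z) (ih (max c z))

theorem mem_le_foldl_max (t : List Int) : ∀ (c b : Int), b ∈ t → b ≤ t.foldl max c := by
  induction t with
  | nil => intro c b h; cases h
  | cons z t ih =>
    intro c b h
    simp only [List.foldl_cons]
    rcases List.mem_cons.mp h with rfl | h
    · exact le_trans (le_max_right c b) (le_foldl_max_self t _)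
    · exact ih _ b h

-- the key recursion satisfied by A's scan/zip/fold computation
theorem maxAbs2_cons_cons (a x : Int) (rs : List Int) :
    maxAbs2 (a :: x :: rs)
      = max |a - ((sufMax (x :: rs)).headD 0)| (maxAbs2 (max a x :: rs)) := by
  cases rs with
  | nil =>
    simp only [maxAbs2, sufMax, preMax, List.zip, List.zipWith, List.foldl, List.headD_cons,
      List.tail_cons]
    simp [abs_nonneg]
  | cons y t =>
    cases h : sufMax (y :: t) with
    | nil => exact absurd h (sufMax_ne_nil y t)
    | cons m ms =>
      simp only [maxAbs2, sufMax, preMax, h, List.tail_cons, List.headD_cons,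
        List.zip_cons_cons, List.foldl_cons]
      rw [show max (0 : Int) |a - max x m| = max |a - max x m| 0 from max_comm _ _,
        foldl_step_max]
      simp [abs_nonneg]

theorem getLast_mem_cons (x : Int) (rs : List Int) :
    (x :: rs).getLast (by simp) ∈ x :: rs := List.getLast_mem _

theorem maxAbs2_alt_cons (a : Int) (rest : List Int) :
    maxAbs2_alt (a :: rest)
      = rest.foldl max a - min a ((a :: rest).getLast (by simp)) := by
  simp only [maxAbs2_alt, PySem.List.max?_id_cons, Option.getD_some]
  congr 1
  congr 1
  · simp [PySem.List.pyGetD]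
  · rw [PySem.List.pyGetD_neg_one (a :: rest) 0 (by simp)]

theorem maxAbs2_eq (rest : List Int) : ∀ a : Int, maxAbs2 (a :: rest) = maxAbs2_alt (a :: rest) := by
  induction rest with
  | nil =>
    intro a
    rw [maxAbs2_alt_cons]
    simp [maxAbs2, sufMax, preMax, List.zip]
  | cons x rs ih =>
    intro a
    rw [maxAbs2_cons_cons, ih (max a x), sufMax_headD, maxAbs2_alt_cons, maxAbs2_alt_cons]
    cases rs with
    | nil =>
      have h1 : ((a :: [x]).getLast (by simp)) = x := by simp
      have h2 : ((max a x :: ([] : List Int)).getLast (by simp)) = max a x := by simp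
      rw [h1, h2]
      simp only [List.foldl_nil, List.foldl_cons]
      have habs : |a - x| = max a x - min a x := by
        rw [abs_sub_comm]; exact (max_sub_min_eq_abs a x).symm
      omega
    | cons y t =>
      have hlast1 : ((a :: x :: y :: t).getLast (by simp)) = ((y :: t).getLast (by simp)) := by
        simp [List.getLast]
      have hlast2 : ((max a x :: y :: t).getLast (by simp)) = ((y :: t).getLast (by simp)) := by
        simp [List.getLast]
      rw [hlast1, hlast2]
      set S := (y :: t).foldl max x with hS
      set b := ((y :: t).getLast (by simp)) with hb
      have hS' : S = t.foldl max (max x y) := by rw [hS]; simp only [List.foldl_cons]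
      have hbS : b ≤ S := mem_le_foldl_max (y :: t) x b (getLast_mem_cons y t)
      have hMall : (x :: y :: t).foldl max a = max a S := by
        simp only [List.foldl_cons, max_assoc]
        rw [foldl_max_assoc, hS']
      have hM' : (y :: t).foldl max (max a x) = max a S := by
        simp only [List.foldl_cons]
        rw [max_assoc, foldl_max_assoc, hS']
      rw [hMall, hM']
      have habs : |a - S| = max a S - min a S := by
        rw [abs_sub_comm]; exact (max_sub_min_eq_abs a S).symm
      omega

-- ===== VERDICT (by name: the statement is the Claim_ definition above) =====
theorem maxAbs2_spec : Claim_equal_maxAbs2 := by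
  intro arr _ hpre
  unfold Spec_maxAbs2
  cases arr with
  | nil => exact absurd rfl hpre
  | cons a rest => exact maxAbs2_eq rest a
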